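-- pv_equiv track=rewrite | github.com/briansenas/Priv-master | ProgDatos/Python/exercises/all_exercises.py | todas_las_letras
-- ===== SOURCE A (Python) =====
-- def todas_las_letras(palabra, letras):
--     counter = {}
--     for char in letras:
--         if char in counter.keys():
--             counter[char] += 1
--         else:
--             counter[char] = 1
--     for char in palabra:
--         if char in counter.keys():
--             counter[char] -= 1
--             if counter[char] < 0:
--                 return False
--     return sum(counter.values()) == 0
-- ===== SOURCE B (Python) =====
-- def todas_las_letras(palabra, letras):
--     return all(palabra.count(c) == letras.count(c) for c in set(letras))
-- ===== Notes on version B (the rewrite author's own statement) =====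
-- stated objective: idiomatic
-- what changed: Instead of building a mutable counter of letras and destructively decrementing it per palabra character with an early return plus a final sum==0 test, B checks declaratively that every distinct character of letras occurs equally often in palabra and in letras.
import Mathlib
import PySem

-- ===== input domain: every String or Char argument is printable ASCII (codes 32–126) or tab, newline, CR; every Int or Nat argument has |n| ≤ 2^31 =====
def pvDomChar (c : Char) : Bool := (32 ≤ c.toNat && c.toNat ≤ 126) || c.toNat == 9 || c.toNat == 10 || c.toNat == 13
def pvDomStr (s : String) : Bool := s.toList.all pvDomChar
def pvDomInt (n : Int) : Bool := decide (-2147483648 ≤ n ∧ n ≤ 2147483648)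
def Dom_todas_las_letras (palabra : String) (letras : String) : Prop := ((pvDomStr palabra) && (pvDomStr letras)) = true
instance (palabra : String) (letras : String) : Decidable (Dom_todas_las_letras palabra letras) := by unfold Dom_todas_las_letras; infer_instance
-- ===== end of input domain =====

-- B replaces A's destructive decrement-a-counter loop (with early return and a final sum==0 test)
-- by a declarative per-letter count comparison (idiomatic; a timing run measured it faster by a constant factor).

-- ===== PORT A =====
-- A's first loop: build the counter dict of letras
def tllBuild (letras : List Char) : PySem.Dict Char Int :=
  letras.foldl
    (fun d c => if d.contains c then d.insert c (d.getD c 0 + 1) else d.insert c 1)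
    PySem.Dict.empty

-- A's second loop: decrement per palabra char; none = the early 'return False'
def tllLoop : List Char → PySem.Dict Char Int → Option (PySem.Dict Char Int)
  | [], d => some d
  | c :: cs, d =>
    if d.contains c then
      let d' := d.insert c (d.getD c 0 - 1)
      if d'.getD c 0 < 0 then none else tllLoop cs d'
    else tllLoop cs d

def todas_las_letras (palabra : String) (letras : String) : Bool :=
  match tllLoop palabra.toList (tllBuild letras.toList) with
  | none => false
  | some d => decide (d.values.sum = 0)

-- ===== PORT B =====
-- Source B: all(palabra.count(c) == letras.count(c) for c in set(letras));
-- str.count with a single-character needle is exactly the character count (List.count);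
-- all(...) over a set does not depend on iteration order.
def todas_las_letras_alt (palabra : String) (letras : String) : Bool :=
  (PySem.Set.ofList letras.toList).all
    (fun c => palabra.toList.count c == letras.toList.count c)

-- ===== PRECONDITION & SPEC =====
def Spec_todas_las_letras (palabra : String) (letras : String) (out : Bool) : Prop := out = todas_las_letras_alt palabra letras
instance (palabra : String) (letras : String) (out : Bool) : Decidable (Spec_todas_las_letras palabra letras out) := by unfold Spec_todas_las_letras; infer_instance

-- ===== CLAIM (what is proved, stated in full; the proofs are below) =====
def Claim_equal_todas_las_letras : Prop := ∀ (palabra : String) (letras : String), Dom_todas_las_letras palabra letras → Spec_todas_las_letras palabra letras (todas_las_letras palabra letras)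

-- ===== LEMMAS AND PROOFS =====

-- A's first loop is exactly Counter(letras)
theorem tllBuild_eq_counter (L : List Char) : tllBuild L = PySem.Dict.counter L := by
  rw [tllBuild, ← PySem.Dict.foldl_insert_getD_add_one_eq_counter]
  congr 1
  funext d c
  by_cases h : d.contains c = true
  · simp [h]
  · have h0 : d.getD c 0 = 0 := PySem.Dict.getD_of_not_contains d 0 (by simpa using h)
    simp [h, h0]

-- a sum of nonnegative integers vanishes iff every summand does
theorem sum_nonneg_eq_zero_iff (l : List Int) (h : ∀ x ∈ l, 0 ≤ x) :
    l.sum = 0 ↔ ∀ x ∈ l, x = 0 := by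
  induction l with
  | nil => simp
  | cons x xs ih =>
    simp only [List.sum_cons, List.mem_cons] at *
    have hx := h x (Or.inl rfl)
    have hs : 0 ≤ xs.sum := List.sum_nonneg (fun y hy => h y (Or.inr hy))
    constructor
    · intro h0
      have : x = 0 ∧ xs.sum = 0 := by omega
      rintro y (rfl | hy)
      · exact this.1
      · exact (ih (fun y hy => h y (Or.inr hy))).mp this.2 y hy
    · intro hall
      have := (ih (fun y hy => h y (Or.inr hy))).mpr (fun y hy => hall y (Or.inr hy))
      have := hall x (Or.inl rfl)
      omega

-- invariant of A's second loop on a dict with unique keys and nonnegative values: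
-- it returns none iff some key is over-consumed, and otherwise each key's value
-- drops by exactly the number of occurrences consumed
theorem tllLoop_invariant (P : List Char) : ∀ (d : PySem.Dict Char Int),
    d.keys.Nodup → (∀ c ∈ d.keys, 0 ≤ d.getD c 0) →
    (tllLoop P d = none ↔ ∃ c ∈ d.keys, d.getD c 0 < (P.count c : Int)) ∧
    (∀ d', tllLoop P d = some d' →
      d'.keys = d.keys ∧ ∀ c ∈ d.keys, d'.getD c 0 = d.getD c 0 - (P.count c : Int)) := by
  induction P with
  | nil =>
    intro d hnd hnn
    refine ⟨?_, ?_⟩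
    · simp only [tllLoop]
      constructor
      · intro h; cases h
      · rintro ⟨c, hc, hlt⟩
        have := hnn c hc
        simp at hlt
        omega
    · intro d' h
      simp only [tllLoop, Option.some.injEq] at h
      subst h
      exact ⟨rfl, fun c hc => by simp⟩
  | cons c cs ih =>
    intro d hnd hnn
    by_cases hc : d.contains c = true
    · have hck : c ∈ d.keys := (PySem.Dict.contains_iff_mem_keys d c).mp hc
      have hunfold : tllLoop (c :: cs) d =
          if (d.insert c (d.getD c 0 - 1)).getD c 0 < 0 then none
          else tllLoop cs (d.insert c (d.getD c 0 - 1)) := by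
        simp only [tllLoop, hc, if_true]
      have hkeys' : (d.insert c (d.getD c 0 - 1)).keys = d.keys :=
        PySem.Dict.keys_insert_of_contains d (d.getD c 0 - 1) hc
      have hnd' : (d.insert c (d.getD c 0 - 1)).keys.Nodup := hkeys' ▸ hnd
      have hgetD : ∀ x, (d.insert c (d.getD c 0 - 1)).getD x 0 =
          if x = c then d.getD c 0 - 1 else d.getD x 0 := by
        intro x; rw [PySem.Dict.getD_insert]
      by_cases h2 : (d.insert c (d.getD c 0 - 1)).getD c 0 < 0
      · -- early return False
        have hg := hgetD c
        simp only at hg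
        have hz : d.getD c 0 = 0 := by
          have h0 := hnn c hck; omega
        rw [hunfold, if_pos h2]
        refine ⟨?_, ?_⟩
        · constructor
          · intro _
            refine ⟨c, hck, ?_⟩
            rw [hz]
            have : 0 < (c :: cs).count c := by simp
            exact_mod_cast this
          · intro _; rfl
        · intro d'' h; cases h
      · -- continue with the decremented dict
        rw [not_lt] at h2
        have hnn' : ∀ x ∈ (d.insert c (d.getD c 0 - 1)).keys,
            0 ≤ (d.insert c (d.getD c 0 - 1)).getD x 0 := by
          intro x hx
          rw [hgetD x]
          by_cases hxc : x = c
          · subst hxc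
            have := hgetD x; rw [if_pos rfl] at this
            rw [if_pos rfl]; omega
          · rw [if_neg hxc]; exact hnn x (hkeys' ▸ hx)
        obtain ⟨ihn, ihs⟩ := ih (d.insert c (d.getD c 0 - 1)) hnd' hnn'
        rw [hunfold, if_neg (by omega)]
        have hcnt : ∀ x ∈ d.keys,
            ((d.insert c (d.getD c 0 - 1)).getD x 0 < (cs.count x : Int)) ↔
            (d.getD x 0 < ((c :: cs).count x : Int)) := by
          intro x hx
          rw [hgetD x]
          by_cases hxc : x = c
          · subst hxc
            rw [if_pos rfl]
            simp
          · have hcx : ¬ c = x := fun h => hxc h.symm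
            rw [if_neg hxc]
            simp [hcx]
        refine ⟨?_, ?_⟩
        · rw [ihn]
          rw [hkeys']
          constructor
          · rintro ⟨x, hx, hlt⟩; exact ⟨x, hx, (hcnt x hx).mp hlt⟩
          · rintro ⟨x, hx, hlt⟩; exact ⟨x, hx, (hcnt x hx).mpr hlt⟩
        · intro d'' h
          obtain ⟨hk, hv⟩ := ihs d'' h
          refine ⟨hk.trans hkeys', ?_⟩
          intro x hx
          have hvx := hv x (hkeys' ▸ hx)
          rw [hgetD x] at hvx
          by_cases hxc : x = c
          · subst hxc
            rw [if_pos rfl] at hvx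
            rw [hvx]
            simp
            omega
          · have hcx : ¬ c = x := fun h => hxc h.symm
            rw [if_neg hxc] at hvx
            rw [hvx]
            simp [hcx]
    · -- c not a key: dict unchanged
      have hck : c ∉ d.keys := fun h => hc ((PySem.Dict.contains_iff_mem_keys d c).mpr h)
      have hstep : tllLoop (c :: cs) d = tllLoop cs d := by
        simp only [tllLoop]
        rw [if_neg hc]
      obtain ⟨ihn, ihs⟩ := ih d hnd hnn
      have hcnt : ∀ x ∈ d.keys, ((c :: cs).count x : Int) = (cs.count x : Int) := by
        intro x hx
        have hcx : ¬ c = x := fun h => hck (h ▸ hx)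
        simp [hcx]
      refine ⟨?_, ?_⟩
      · rw [hstep, ihn]
        constructor
        · rintro ⟨x, hx, hlt⟩; exact ⟨x, hx, by rw [hcnt x hx]; exact hlt⟩
        · rintro ⟨x, hx, hlt⟩; exact ⟨x, hx, by rw [← hcnt x hx]; exact hlt⟩
      · intro d'' h
        rw [hstep] at h
        obtain ⟨hk, hv⟩ := ihs d'' h
        exact ⟨hk, fun x hx => by rw [hcnt x hx]; exact hv x hx⟩

-- the two sides agree, stated on the character lists
theorem tll_main (P L : List Char) :
    (match tllLoop P (PySem.Dict.counter L) with
     | none => false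
     | some d => decide (d.values.sum = 0))
    = (PySem.Set.ofList L).all (fun c => P.count c == L.count c) := by
  have hnd : (PySem.Dict.counter L).keys.Nodup := PySem.Dict.nodup_keys_counter L
  have hkeys : (PySem.Dict.counter L).keys = PySem.Set.ofList L := PySem.Dict.keys_counter L
  have hgd : ∀ c, (PySem.Dict.counter L).getD c 0 = (L.count c : Int) :=
    fun c => PySem.Dict.getD_counter L c
  have hnn : ∀ c ∈ (PySem.Dict.counter L).keys, 0 ≤ (PySem.Dict.counter L).getD c 0 := by
    intro c _; rw [hgd c]; positivity
  obtain ⟨hnone, hsome⟩ := tllLoop_invariant P (PySem.Dict.counter L) hnd hnn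
  cases h : tllLoop P (PySem.Dict.counter L) with
  | none =>
    obtain ⟨c, hc, hlt⟩ := hnone.mp h
    rw [hgd c] at hlt
    rw [hkeys] at hc
    symm
    rw [show (match (none : Option (PySem.Dict Char Int)) with
      | none => false
      | some d => decide (d.values.sum = 0)) = false from rfl]
    rw [List.all_eq_false]
    refine ⟨c, hc, ?_⟩
    simp only [beq_iff_eq]
    omega
  | some d' =>
    obtain ⟨hk, hv⟩ := hsome d' h
    have hnd' : d'.keys.Nodup := hk ▸ hnd
    have hvals : d'.values = d'.keys.map (fun k => d'.getD k 0) :=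
      PySem.Dict.values_eq_map_keys d' hnd' 0
    have hle : ∀ c ∈ (PySem.Dict.counter L).keys,
        (P.count c : Int) ≤ (PySem.Dict.counter L).getD c 0 := by
      intro c hc
      by_contra hlt
      rw [not_le] at hlt
      have : tllLoop P (PySem.Dict.counter L) = none := hnone.mpr ⟨c, hc, hlt⟩
      rw [h] at this; cases this
    have hmap : d'.values = (PySem.Set.ofList L).map
        (fun c => (L.count c : Int) - (P.count c : Int)) := by
      rw [hvals, hk, hkeys]
      apply List.map_congr_left
      intro c hc
      rw [hv c (hkeys ▸ hc), hgd c]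
    rw [Bool.eq_iff_iff, decide_eq_true_iff, List.all_eq_true, hmap]
    rw [sum_nonneg_eq_zero_iff]
    · constructor
      · intro hz c hc
        have := hz _ (List.mem_map_of_mem hc)
        simp only [beq_iff_eq]
        omega
      · rintro hall x hx
        obtain ⟨c, hc, rfl⟩ := List.mem_map.mp hx
        have := hall c hc
        simp only [beq_iff_eq] at this
        omega
    · rintro x hx
      obtain ⟨c, hc, rfl⟩ := List.mem_map.mp hx
      have := hle c (hkeys ▸ hc)
      rw [hgd c] at this
      omega

-- ===== VERDICT (by name: the statement is the Claim_ definition above) =====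
theorem todas_las_letras_spec : Claim_equal_todas_las_letras := by
  intro palabra letras _
  show todas_las_letras palabra letras = todas_las_letras_alt palabra letras
  rw [todas_las_letras, todas_las_letras_alt, tllBuild_eq_counter]
  exact tll_main palabra.toList letras.toList
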